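-- pv_equiv track=rewrite | github.com/fpmosley/advent-of-code | 2021/day22/part02/reactor_reboot_first_attempt.py | find_off_overlaps
-- ===== SOURCE A (Python) =====
-- def find_off_overlaps(ranges: set, test_min: int, test_max: int) -> tuple:
--     new_ranges = set()
--     if not ranges:
--         return 0, ranges
--
--     intersection = set()
--     test_range = range(test_min, test_max + 1)
--     for range_min, range_max in ranges:
--         a_range = set(range(range_min, range_max + 1))
--         result = a_range.intersection(test_range)
--         if result:
--             # Update the intersection set and update the range
--             intersection.update(result)
--             if range_min < test_min < test_max < range_max:
--                 # Test min and max are enclosed in range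
--                 new_ranges.update([(range_min, test_min), (test_max, range_max)])
--             elif range_min < test_min < range_max:
--                 # Test min is in the range
--                 new_ranges.update([(range_min, test_min)])
--             elif range_min < test_max < range_max:
--                 # Test max is in the range
--                 new_ranges.update([(test_max, range_max)])
--         else:
--             # No intersection. Add the existing range.
--             new_ranges.update([(range_min, range_max)])
--
--     return len(intersection), new_ranges
-- ===== SOURCE B (Python) =====
-- def find_off_overlaps(ranges: set, test_min: int, test_max: int) -> tuple:
--     if not ranges:
--         return 0, ranges
--     new_ranges = set()
--     intervals = []
--     for range_min, range_max in ranges: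
--         lo = max(range_min, test_min)
--         hi = min(range_max, test_max)
--         if lo <= hi:
--             # Overlap: record the intersection as an interval, trim the range.
--             intervals.append((lo, hi))
--             if range_min < test_min < test_max < range_max:
--                 new_ranges.add((range_min, test_min))
--                 new_ranges.add((test_max, range_max))
--             elif range_min < test_min < range_max:
--                 new_ranges.add((range_min, test_min))
--             elif range_min < test_max < range_max:
--                 new_ranges.add((test_max, range_max))
--         else:
--             new_ranges.add((range_min, range_max))
--     # Count the union of the intersection intervals by sorting and merging.
--     intervals.sort(key=lambda iv: iv[0])
--     total = 0
--     cur = None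
--     for lo, hi in intervals:
--         if cur is None:
--             cur = (lo, hi)
--         elif lo > cur[1] + 1:
--             total += cur[1] - cur[0] + 1
--             cur = (lo, hi)
--         elif hi > cur[1]:
--             cur = (cur[0], hi)
--     if cur is not None:
--         total += cur[1] - cur[0] + 1
--     return total, new_ranges
-- ===== Notes on version B (the rewrite author's own statement) =====
-- stated objective: alternative
-- what changed: A materialises every integer point of each range and counts the union of point sets; B computes each intersection interval arithmetically and counts the union by sorting the intervals and merging, never enumerating points (asymptotically cheaper in the integer span; measured comparable on many-small-interval inputs, so no speed claim).
import Mathlib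
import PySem

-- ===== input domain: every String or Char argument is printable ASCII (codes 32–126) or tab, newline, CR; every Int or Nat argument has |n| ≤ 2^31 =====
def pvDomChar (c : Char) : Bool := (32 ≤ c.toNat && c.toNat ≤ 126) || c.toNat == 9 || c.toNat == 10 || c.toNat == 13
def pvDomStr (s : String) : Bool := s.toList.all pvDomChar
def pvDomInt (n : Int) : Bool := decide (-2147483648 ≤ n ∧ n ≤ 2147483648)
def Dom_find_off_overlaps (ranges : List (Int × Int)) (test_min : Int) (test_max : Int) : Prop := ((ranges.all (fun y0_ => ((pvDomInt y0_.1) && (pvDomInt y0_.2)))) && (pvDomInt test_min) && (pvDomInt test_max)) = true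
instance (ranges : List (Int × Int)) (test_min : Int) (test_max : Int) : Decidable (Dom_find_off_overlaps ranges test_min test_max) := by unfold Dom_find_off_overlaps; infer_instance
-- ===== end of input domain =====

-- B replaces A's enumeration of every integer point of each range by arithmetic on interval
-- endpoints plus a sort-and-merge count of the union (same return value).
-- Python's sets: 'ranges'/'new_ranges'/'intersection' are PySem.Set lists compared as finite sets;
-- the results below do not depend on Python's set iteration order.

-- ===== PORT A =====
def pvAStep (test_min test_max : Int) (st : PySem.Set Int × PySem.Set (Int × Int)) (p : Int × Int) :
    PySem.Set Int × PySem.Set (Int × Int) :=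
  -- set(range(range_min, range_max + 1)): a range has no duplicates, so the Set is the range
  -- list itself (PySem.Set.ofList_eq_self_of_nodup, PySem.List.nodup_pyRange_one)
  let a_range : PySem.Set Int := PySem.List.pyRange p.1 (p.2 + 1) 1
  -- a_range.intersection(test_range) = Set.inter with the lazy range object: filter a_range by
  -- membership in range(test_min, test_max + 1), which is exactly test_min ≤ x < test_max + 1
  let result : PySem.Set Int := a_range.filter (fun x => decide (test_min ≤ x ∧ x < test_max + 1))
  if result ≠ [] then
    (PySem.Set.update st.1 result,
      if p.1 < test_min ∧ test_min < test_max ∧ test_max < p.2 then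
        PySem.Set.update st.2 [(p.1, test_min), (test_max, p.2)]
      else if p.1 < test_min ∧ test_min < p.2 then
        PySem.Set.update st.2 [(p.1, test_min)]
      else if p.1 < test_max ∧ test_max < p.2 then
        PySem.Set.update st.2 [(test_max, p.2)]
      else st.2)
  else
    (st.1, PySem.Set.update st.2 [(p.1, p.2)])

def find_off_overlaps (ranges : List (Int × Int)) (test_min : Int) (test_max : Int) :
    Int × (List (Int × Int)) :=
  if ranges = [] then (0, ranges)
  else
    let res := ranges.foldl (pvAStep test_min test_max) (PySem.Set.empty, PySem.Set.empty)
    (PySem.Set.len res.1, res.2)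

-- ===== PORT B =====
def pvBStep (test_min test_max : Int) (st : List (Int × Int) × PySem.Set (Int × Int)) (p : Int × Int) :
    List (Int × Int) × PySem.Set (Int × Int) :=
  let lo := max p.1 test_min
  let hi := min p.2 test_max
  if lo ≤ hi then
    (st.1 ++ [(lo, hi)],
      if p.1 < test_min ∧ test_min < test_max ∧ test_max < p.2 then
        PySem.Set.add (PySem.Set.add st.2 (p.1, test_min)) (test_max, p.2)
      else if p.1 < test_min ∧ test_min < p.2 then
        PySem.Set.add st.2 (p.1, test_min)
      else if p.1 < test_max ∧ test_max < p.2 then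
        PySem.Set.add st.2 (test_max, p.2)
      else st.2)
  else
    (st.1, PySem.Set.add st.2 p)

def pvMergeStep (acc : Int × Option (Int × Int)) (iv : Int × Int) : Int × Option (Int × Int) :=
  match acc.2 with
  | none => (acc.1, some iv)
  | some cur =>
    if iv.1 > cur.2 + 1 then (acc.1 + (cur.2 - cur.1 + 1), some iv)
    else if iv.2 > cur.2 then (acc.1, some (cur.1, iv.2))
    else acc

def pvMergeFin (r : Int × Option (Int × Int)) : Int :=
  match r.2 with
  | none => r.1
  | some cur => r.1 + (cur.2 - cur.1 + 1)

def pvMergeCount (ivs : List (Int × Int)) : Int :=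
  pvMergeFin (ivs.foldl pvMergeStep (0, none))

def find_off_overlaps_alt (ranges : List (Int × Int)) (test_min : Int) (test_max : Int) :
    Int × (List (Int × Int)) :=
  if ranges = [] then (0, ranges)
  else
    let res := ranges.foldl (pvBStep test_min test_max) ([], PySem.Set.empty)
    (pvMergeCount (PySem.List.sorted res.1 (fun iv => iv.1) false), res.2)

-- ===== PRECONDITION & SPEC =====
def Spec_find_off_overlaps (ranges : List (Int × Int)) (test_min : Int) (test_max : Int) (out : Int × (List (Int × Int))) : Prop := out = find_off_overlaps_alt ranges test_min test_max
instance (ranges : List (Int × Int)) (test_min : Int) (test_max : Int) (out : Int × (List (Int × Int))) : Decidable (Spec_find_off_overlaps ranges test_min test_max out) := by unfold Spec_find_off_overlaps; infer_instance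

-- ===== CLAIM (what is proved, stated in full; the proofs are below) =====
def Claim_equal_find_off_overlaps : Prop := ∀ (ranges : List (Int × Int)) (test_min : Int) (test_max : Int), Dom_find_off_overlaps ranges test_min test_max → Spec_find_off_overlaps ranges test_min test_max (find_off_overlaps ranges test_min test_max)

-- ===== LEMMAS AND PROOFS =====

-- the set of integer points covered by a list of (inclusive) intervals
noncomputable def pvPts (l : List (Int × Int)) : Finset Int :=
  l.foldr (fun iv s => Finset.Icc iv.1 iv.2 ∪ s) ∅

lemma mem_pvPts (l : List (Int × Int)) (x : Int) :
    x ∈ pvPts l ↔ ∃ iv ∈ l, iv.1 ≤ x ∧ x ≤ iv.2 := by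
  induction l with
  | nil => simp [pvPts]
  | cons a t ih =>
    simp only [pvPts, List.foldr_cons, Finset.mem_union, Finset.mem_Icc, List.mem_cons]
    rw [show (List.foldr (fun iv s => Finset.Icc iv.1 iv.2 ∪ s) ∅ t) = pvPts t from rfl, ih]
    constructor
    · rintro (⟨h1, h2⟩ | ⟨iv, hm, h⟩)
      · exact ⟨a, Or.inl rfl, h1, h2⟩
      · exact ⟨iv, Or.inr hm, h⟩
    · rintro ⟨iv, (rfl | hm), h⟩
      · exact Or.inl h
      · exact Or.inr ⟨iv, hm, h⟩

lemma pvPts_perm {l l' : List (Int × Int)} (h : l.Perm l') : pvPts l = pvPts l' := by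
  ext x; rw [mem_pvPts, mem_pvPts]
  constructor <;> rintro ⟨iv, hm, hx⟩
  · exact ⟨iv, h.mem_iff.mp hm, hx⟩
  · exact ⟨iv, h.mem_iff.mpr hm, hx⟩

lemma pvPts_append_singleton (l : List (Int × Int)) (iv : Int × Int) :
    pvPts (l ++ [iv]) = pvPts l ∪ Finset.Icc iv.1 iv.2 := by
  ext x
  simp only [mem_pvPts, Finset.mem_union, Finset.mem_Icc, List.mem_append, List.mem_singleton]
  constructor
  · rintro ⟨j, (hm | rfl), hx⟩
    · exact Or.inl ⟨j, hm, hx⟩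
    · exact Or.inr hx
  · rintro (⟨j, hm, hx⟩ | hx)
    · exact ⟨j, Or.inl hm, hx⟩
    · exact ⟨iv, Or.inr rfl, hx⟩

-- characterisation of A's per-range intersection set
lemma mem_pvResult (rmin rmax tmin tmax x : Int) :
    x ∈ (PySem.List.pyRange rmin (rmax + 1) 1).filter
          (fun x => decide (tmin ≤ x ∧ x < tmax + 1))
      ↔ max rmin tmin ≤ x ∧ x ≤ min rmax tmax := by
  rw [List.mem_filter, PySem.List.mem_pyRange_one]
  simp only [decide_eq_true_eq]
  omega

lemma pvResult_ne_nil (rmin rmax tmin tmax : Int) :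
    ((PySem.List.pyRange rmin (rmax + 1) 1).filter
        (fun x => decide (tmin ≤ x ∧ x < tmax + 1)) ≠ [])
      ↔ max rmin tmin ≤ min rmax tmax := by
  rw [Ne, List.eq_nil_iff_forall_not_mem]
  push Not
  constructor
  · rintro ⟨x, hx⟩
    have := (mem_pvResult rmin rmax tmin tmax x).mp hx
    omega
  · intro h
    exact ⟨max rmin tmin, (mem_pvResult rmin rmax tmin tmax _).mpr ⟨le_refl _, h⟩⟩

-- the merge fold counts exactly the union of the points, for sorted nonempty intervals
lemma pvMergeGo (l : List (Int × Int)) :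
    ∀ (t cl ch : Int), cl ≤ ch →
    l.Pairwise (fun a b => a.1 ≤ b.1) →
    (∀ iv ∈ l, iv.1 ≤ iv.2) → (∀ iv ∈ l, cl ≤ iv.1) →
    pvMergeFin (l.foldl pvMergeStep (t, some (cl, ch)))
      = t + (((Finset.Icc cl ch ∪ pvPts l).card : Int)) := by
  induction l with
  | nil =>
    intro t cl ch hcl _ _ _
    simp only [List.foldl_nil, pvMergeFin, pvPts, List.foldr_nil, Finset.union_empty,
      Int.card_Icc]
    omega
  | cons a l' ih =>
    intro t cl ch hcl hp hne hlo
    have hpa : ∀ b ∈ l', a.1 ≤ b.1 := (List.pairwise_cons.mp hp).1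
    have hp' : l'.Pairwise (fun a b => a.1 ≤ b.1) := (List.pairwise_cons.mp hp).2
    have hnea : a.1 ≤ a.2 := hne a (List.mem_cons_self ..)
    have hloa : cl ≤ a.1 := hlo a (List.mem_cons_self ..)
    have hpts : pvPts (a :: l') = Finset.Icc a.1 a.2 ∪ pvPts l' := rfl
    by_cases h1 : a.1 > ch + 1
    · have hstep : pvMergeStep (t, some (cl, ch)) a = (t + (ch - cl + 1), some a) := by
        simp [pvMergeStep, h1]
      rw [List.foldl_cons, hstep]
      have hrec := ih (t + (ch - cl + 1)) a.1 a.2 hnea hp'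
        (fun iv hm => hne iv (List.mem_cons_of_mem _ hm)) hpa
      rw [show (some a : Option (Int × Int)) = some (a.1, a.2) from rfl, hrec]
      have hdisj : Disjoint (Finset.Icc cl ch) (Finset.Icc a.1 a.2 ∪ pvPts l') := by
        rw [Finset.disjoint_left]
        intro x hx hx'
        have hx1 : x ≤ ch := (Finset.mem_Icc.mp hx).2
        rcases Finset.mem_union.mp hx' with h | h
        · have := (Finset.mem_Icc.mp h).1; omega
        · obtain ⟨iv, hm, hiv⟩ := (mem_pvPts l' x).mp h
          have := hpa iv hm; omega
      rw [hpts, Finset.card_union_of_disjoint hdisj, Int.card_Icc]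
      push_cast
      omega
    · by_cases h2 : a.2 > ch
      · have hstep : pvMergeStep (t, some (cl, ch)) a = (t, some (cl, a.2)) := by
          simp [pvMergeStep, h1, h2]
        rw [List.foldl_cons, hstep]
        have hrec := ih t cl a.2 (by omega) hp'
          (fun iv hm => hne iv (List.mem_cons_of_mem _ hm))
          (fun iv hm => le_trans hloa (hpa iv hm))
        have hU : Finset.Icc cl ch ∪ Finset.Icc a.1 a.2 = Finset.Icc cl a.2 := by
          ext x
          simp only [Finset.mem_union, Finset.mem_Icc]
          omega
        rw [hrec, hpts, ← Finset.union_assoc, hU]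
      · have hstep : pvMergeStep (t, some (cl, ch)) a = (t, some (cl, ch)) := by
          simp [pvMergeStep, h1, h2]
        rw [List.foldl_cons, hstep]
        have hrec := ih t cl ch hcl hp'
          (fun iv hm => hne iv (List.mem_cons_of_mem _ hm))
          (fun iv hm => le_trans hloa (hpa iv hm))
        have hU : Finset.Icc cl ch ∪ Finset.Icc a.1 a.2 = Finset.Icc cl ch := by
          ext x
          simp only [Finset.mem_union, Finset.mem_Icc]
          omega
        rw [hrec, hpts, ← Finset.union_assoc, hU]

lemma pvMergeCount_eq (l : List (Int × Int))
    (hp : l.Pairwise (fun a b => a.1 ≤ b.1)) (hne : ∀ iv ∈ l, iv.1 ≤ iv.2) :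
    pvMergeCount l = ((pvPts l).card : Int) := by
  cases l with
  | nil => simp [pvMergeCount, pvMergeFin, pvPts]
  | cons a l' =>
    have h0 : pvMergeStep (0, none) a = (0, some a) := rfl
    rw [pvMergeCount, List.foldl_cons, h0,
      show (some a : Option (Int × Int)) = some (a.1, a.2) from rfl]
    rw [pvMergeGo l' 0 a.1 a.2 (hne a (List.mem_cons_self ..))
      (List.pairwise_cons.mp hp).2
      (fun iv hm => hne iv (List.mem_cons_of_mem _ hm))
      (List.pairwise_cons.mp hp).1]
    rw [show pvPts (a :: l') = Finset.Icc a.1 a.2 ∪ pvPts l' from rfl]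
    omega

-- the two loops, run side by side, keep: A's point set = points of B's interval list,
-- A's point set stays duplicate-free, B's intervals stay nonempty, and the new_ranges sets agree
lemma pvLoopAB (rs : List (Int × Int)) (tmin tmax : Int) :
    ∀ (I : PySem.Set Int) (L : List (Int × Int)) (N : PySem.Set (Int × Int)),
    I.Nodup → I.toFinset = pvPts L → (∀ iv ∈ L, iv.1 ≤ iv.2) →
    (rs.foldl (pvAStep tmin tmax) (I, N)).1.Nodup ∧
    (rs.foldl (pvAStep tmin tmax) (I, N)).1.toFinset
      = pvPts (rs.foldl (pvBStep tmin tmax) (L, N)).1 ∧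
    (∀ iv ∈ (rs.foldl (pvBStep tmin tmax) (L, N)).1, iv.1 ≤ iv.2) ∧
    (rs.foldl (pvAStep tmin tmax) (I, N)).2 = (rs.foldl (pvBStep tmin tmax) (L, N)).2 := by
  induction rs with
  | nil =>
    intro I L N hnd hfin hne
    exact ⟨hnd, hfin, hne, rfl⟩
  | cons p rs' ih =>
    intro I L N hnd hfin hne
    rw [List.foldl_cons, List.foldl_cons]
    by_cases hov : max p.1 tmin ≤ min p.2 tmax
    · have hres : (PySem.List.pyRange p.1 (p.2 + 1) 1).filter
          (fun x => decide (tmin ≤ x ∧ x < tmax + 1)) ≠ [] :=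
        (pvResult_ne_nil p.1 p.2 tmin tmax).mpr hov
      have hA : pvAStep tmin tmax (I, N) p
          = (PySem.Set.update I ((PySem.List.pyRange p.1 (p.2 + 1) 1).filter
              (fun x => decide (tmin ≤ x ∧ x < tmax + 1))),
             if p.1 < tmin ∧ tmin < tmax ∧ tmax < p.2 then
               PySem.Set.add (PySem.Set.add N (p.1, tmin)) (tmax, p.2)
             else if p.1 < tmin ∧ tmin < p.2 then PySem.Set.add N (p.1, tmin)
             else if p.1 < tmax ∧ tmax < p.2 then PySem.Set.add N (tmax, p.2)
             else N) := by
        simp only [pvAStep, if_pos hres, PySem.Set.update_cons, PySem.Set.update_nil]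
      have hB : pvBStep tmin tmax (L, N) p
          = (L ++ [(max p.1 tmin, min p.2 tmax)],
             if p.1 < tmin ∧ tmin < tmax ∧ tmax < p.2 then
               PySem.Set.add (PySem.Set.add N (p.1, tmin)) (tmax, p.2)
             else if p.1 < tmin ∧ tmin < p.2 then PySem.Set.add N (p.1, tmin)
             else if p.1 < tmax ∧ tmax < p.2 then PySem.Set.add N (tmax, p.2)
             else N) := by
        simp only [pvBStep, if_pos hov]
      rw [hA, hB]
      refine ih _ _ _ (PySem.Set.nodup_update _ _ hnd) ?_ ?_
      · ext x
        rw [List.mem_toFinset, PySem.Set.mem_update, pvPts_append_singleton,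
          Finset.mem_union, ← List.mem_toFinset, hfin, mem_pvResult, Finset.mem_Icc]
      · intro iv hm
        rcases List.mem_append.mp hm with h | h
        · exact hne iv h
        · rw [List.mem_singleton.mp h]; exact hov
    · have hres : ¬ ((PySem.List.pyRange p.1 (p.2 + 1) 1).filter
          (fun x => decide (tmin ≤ x ∧ x < tmax + 1)) ≠ []) := by
        rw [pvResult_ne_nil]; exact hov
      have hA : pvAStep tmin tmax (I, N) p = (I, PySem.Set.add N (p.1, p.2)) := by
        simp only [pvAStep, if_neg hres, PySem.Set.update_cons, PySem.Set.update_nil]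
      have hB : pvBStep tmin tmax (L, N) p = (L, PySem.Set.add N p) := by
        simp only [pvBStep, if_neg hov]
      rw [hA, hB]
      exact ih _ _ _ hnd hfin hne

-- ===== VERDICT (by name: the statement is the Claim_ definition above) =====
theorem find_off_overlaps_spec : Claim_equal_find_off_overlaps := by
  intro ranges tmin tmax _hdom
  unfold Spec_find_off_overlaps
  by_cases h : ranges = []
  · simp [find_off_overlaps, find_off_overlaps_alt, h]
  · obtain ⟨hnd, hfin, hne, hN⟩ :=
      pvLoopAB ranges tmin tmax PySem.Set.empty [] PySem.Set.empty
        (List.nodup_nil) (by rfl) (by intro iv hm; cases hm)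
    simp only [find_off_overlaps, find_off_overlaps_alt, if_neg h]
    refine Prod.ext ?_ hN
    have hsp : (PySem.List.sorted (ranges.foldl (pvBStep tmin tmax)
        ([], PySem.Set.empty)).1 (fun iv => iv.1) false).Pairwise (fun a b => a.1 ≤ b.1) :=
      PySem.List.sorted_pairwise _ _
    have hperm := PySem.List.sorted_perm (ranges.foldl (pvBStep tmin tmax)
        ([], PySem.Set.empty)).1 (fun iv : Int × Int => iv.1) false
    simp only [PySem.Set.len]
    rw [pvMergeCount_eq _ hsp
      (fun iv hm => hne iv (hperm.mem_iff.mp hm)), pvPts_perm hperm, ← hfin,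
      List.toFinset_card_of_nodup hnd]
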